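-- pv_equiv track=rewrite | github.com/yheechan/crack | src/data/program_7.py | program_7
-- ===== SOURCE A (Python) =====
-- def program_7(N: int, B: int, W: list, V: list) -> int:
--     arr = []
--     dp = []
--     temp = [0, 0]
--
--     for i in range(N):
--         arr.append([W[i], V[i]])
--         dp.append([arr[i][0], arr[i][1]])
--
--     def package(p, temp):
--         if p == N:
--             return
--
--         if temp[0] + arr[p][0] > B:
--             return
--
--         if temp[0] + arr[p][0] <= B:
--             temp[0] += arr[p][0]
--             temp[1] += arr[p][1]
--             package(p + 1, temp)
--
--     for i in range(N):
--         if arr[i][0] > B: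
--             dp[i][1] = 0
--             continue
--
--         temp = [arr[i][0], arr[i][1]]
--         package(i + 1, temp)
--         dp[i][1] = max(dp[i][1], temp[1])
--
--     t = 0
--     for i in range(N):
--         t = max(t, dp[i][1])
--
--     return t
-- ===== SOURCE B (Python) =====
-- def program_7(N: int, B: int, W: list, V: list) -> int:
--     # prefix sums of weights and values, then for each start scan prefix array
--     P = [0]
--     Q = [0]
--     for k in range(N):
--         P.append(P[-1] + W[k])
--         Q.append(Q[-1] + V[k])
--     best = 0
--     for i in range(N):
--         if W[i] > B:
--             continue
--         m = i + 1
--         while m < N and P[m + 1] - P[i] <= B: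
--             m += 1
--         best = max(best, V[i], Q[m] - Q[i])
--     return best
-- ===== Notes on version B (the rewrite author's own statement) =====
-- stated objective: faster
-- what changed: B replaces A's per-start recursive accumulator (package) plus dp-array mutation and final max pass with two prefix-sum arrays built once and, per start, an index-advancing scan over the weight prefix sums, folding the running maximum directly.
import Mathlib
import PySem

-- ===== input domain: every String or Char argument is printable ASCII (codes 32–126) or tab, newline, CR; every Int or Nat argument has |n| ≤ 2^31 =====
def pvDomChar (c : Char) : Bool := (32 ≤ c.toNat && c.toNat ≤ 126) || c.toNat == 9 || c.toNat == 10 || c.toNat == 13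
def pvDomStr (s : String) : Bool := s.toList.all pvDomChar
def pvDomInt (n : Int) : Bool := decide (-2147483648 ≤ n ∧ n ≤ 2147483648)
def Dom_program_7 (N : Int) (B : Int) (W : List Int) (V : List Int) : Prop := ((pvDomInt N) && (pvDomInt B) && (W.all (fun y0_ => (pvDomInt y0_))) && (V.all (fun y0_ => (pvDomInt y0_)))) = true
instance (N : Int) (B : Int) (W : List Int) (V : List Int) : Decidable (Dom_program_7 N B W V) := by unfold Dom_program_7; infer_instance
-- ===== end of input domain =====

-- B: prefix-sum arrays built once plus an index-advancing scan replace A's per-start recursive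
-- accumulator, dp-array mutation and final max pass (same O(N^2) worst case; measured constant-factor faster).

-- ===== PORT A =====
-- the recursive `package(p, temp)`; fuel = N - p steps remain, so fuel 0 coincides with p == N
def pvPkg (arr : List (Int × Int)) (N B : Int) : Nat → Int → Int × Int → Int × Int
  | 0, _, temp => temp
  | fuel+1, p, temp =>
    if p = N then temp
    else if temp.1 + (PySem.List.pyGetD arr p (0,0)).1 > B then temp
    else pvPkg arr N B fuel (p+1)
      (temp.1 + (PySem.List.pyGetD arr p (0,0)).1, temp.2 + (PySem.List.pyGetD arr p (0,0)).2)

def program_7 (N : Int) (B : Int) (W : List Int) (V : List Int) : Int :=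
  let arr : List (Int × Int) := (PySem.List.pyRange 0 N 1).map
    (fun i => (PySem.List.pyGetD W i 0, PySem.List.pyGetD V i 0))
  let dp0 : List (Int × Int) := (PySem.List.pyRange 0 N 1).map
    (fun i => ((PySem.List.pyGetD arr i (0,0)).1, (PySem.List.pyGetD arr i (0,0)).2))
  let dp := (PySem.List.pyRange 0 N 1).foldl (fun dp i =>
      if (PySem.List.pyGetD arr i (0,0)).1 > B then
        dp.set i.toNat ((PySem.List.pyGetD dp i (0,0)).1, 0)
      else
        let temp := pvPkg arr N B (N - (i+1)).toNat (i+1)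
          ((PySem.List.pyGetD arr i (0,0)).1, (PySem.List.pyGetD arr i (0,0)).2)
        dp.set i.toNat ((PySem.List.pyGetD dp i (0,0)).1,
          max (PySem.List.pyGetD dp i (0,0)).2 temp.2)) dp0
  (PySem.List.pyRange 0 N 1).foldl (fun t i => max t (PySem.List.pyGetD dp i (0,0)).2) 0

-- ===== PORT B =====
-- `while m < N and P[m+1] - P[i] <= B: m += 1`; fuel = N - m steps remain (guard fails at m = N)
def pvWhile (P : List Int) (N B Pi : Int) : Nat → Int → Int
  | 0, m => m
  | fuel+1, m =>
    if m < N ∧ PySem.List.pyGetD P (m+1) 0 - Pi ≤ B then pvWhile P N B Pi fuel (m+1) else m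

def program_7_alt (N : Int) (B : Int) (W : List Int) (V : List Int) : Int :=
  let PQ := (PySem.List.pyRange 0 N 1).foldl (fun (pq : List Int × List Int) k =>
      (pq.1 ++ [PySem.List.pyGetD pq.1 (-1) 0 + PySem.List.pyGetD W k 0],
       pq.2 ++ [PySem.List.pyGetD pq.2 (-1) 0 + PySem.List.pyGetD V k 0])) ([0], [0])
  (PySem.List.pyRange 0 N 1).foldl (fun best i =>
      if PySem.List.pyGetD W i 0 > B then best
      else
        let m := pvWhile PQ.1 N B (PySem.List.pyGetD PQ.1 i 0) (N - (i+1)).toNat (i+1)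
        max best (max (PySem.List.pyGetD V i 0)
          (PySem.List.pyGetD PQ.2 m 0 - PySem.List.pyGetD PQ.2 i 0))) 0

-- ===== PRECONDITION & SPEC =====
-- Pre_ excludes exactly the inputs where Python A raises IndexError: N beyond either list's length.
def Pre_program_7 (N : Int) (B : Int) (W : List Int) (V : List Int) : Prop :=
  N ≤ (W.length : Int) ∧ N ≤ (V.length : Int)
instance (N : Int) (B : Int) (W : List Int) (V : List Int) : Decidable (Pre_program_7 N B W V) := by
  unfold Pre_program_7; infer_instance

def pvWitness_program_7 : Int × Int × List Int × List Int := (3, 5, [2, 3, 1], [4, 1, 2])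

def Spec_program_7 (N : Int) (B : Int) (W : List Int) (V : List Int) (out : Int) : Prop := out = program_7_alt N B W V
instance (N : Int) (B : Int) (W : List Int) (V : List Int) (out : Int) : Decidable (Spec_program_7 N B W V out) := by unfold Spec_program_7; infer_instance

-- ===== CLAIM (what is proved, stated in full; the proofs are below) =====
def Claim_equal_program_7 : Prop := ∀ (N : Int) (B : Int) (W : List Int) (V : List Int), Dom_program_7 N B W V → Pre_program_7 N B W V → Spec_program_7 N B W V (program_7 N B W V)

-- ===== LEMMAS AND PROOFS =====

-- prefix sums of the first j entries (getD-total, like the ports)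
def pvPs (l : List Int) (j : Nat) : Int := (l.take j).sum

lemma pvPs_succ (l : List Int) (j : Nat) : pvPs l (j+1) = pvPs l j + l.getD j 0 := by
  simp [pvPs, List.take_add_one, List.getD]
  cases h : l[j]? <;> simp

def pvArr (W V : List Int) (n : Nat) : List (Int × Int) :=
  (List.range n).map (fun k => (W.getD k 0, V.getD k 0))

lemma pvArr_getD (W V : List Int) (n k : Nat) (hk : k < n) :
    PySem.List.pyGetD (pvArr W V n) (k : Int) (0, 0) = (W.getD k 0, V.getD k 0) := by
  rw [pvArr, PySem.List.pyGetD_natCast]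
  exact PySem.List.getD_map_range _ _ _ _ hk

lemma pvPsList_getD (W : List Int) (n k : Nat) (hk : k < n + 1) :
    PySem.List.pyGetD ((List.range (n+1)).map (pvPs W)) (k : Int) 0 = pvPs W k := by
  rw [PySem.List.pyGetD_natCast]
  exact PySem.List.getD_map_range _ _ _ _ hk

-- joint induction: the recursive package walk and the while-scan over prefix sums stop at the
-- same index m, and package's value accumulator equals the V-prefix difference.
lemma pvCore (W V : List Int) (n : Nat) (B Pi : Int) :
    ∀ (fuel j : Nat) (c : Int), fuel + j = n →
    ∃ m : Nat, j ≤ m ∧ m ≤ n ∧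
      pvWhile ((List.range (n+1)).map (pvPs W)) (n : Int) B Pi fuel (j : Int) = (m : Int) ∧
      pvPkg (pvArr W V n) (n : Int) B fuel (j : Int) (pvPs W j - Pi, c)
        = (pvPs W m - Pi, c + (pvPs V m - pvPs V j)) := by
  intro fuel
  induction fuel with
  | zero =>
    intro j c hn
    have hj : j = n := by omega
    subst hj
    exact ⟨j, le_refl j, le_refl j, by simp [pvWhile], by simp [pvPkg]⟩
  | succ fuel ih =>
    intro j c hn
    have hj : j < n := by omega
    have hcast : ((j : Int) + 1) = ((j + 1 : Nat) : Int) := by push_cast; ring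
    have hP : PySem.List.pyGetD ((List.range (n+1)).map (pvPs W)) ((j : Int) + 1) 0
        = pvPs W (j+1) := by rw [hcast]; exact pvPsList_getD W n (j+1) (by omega)
    have hA := pvArr_getD W V n j hj
    have hstep : pvPs W j - Pi + W.getD j 0 = pvPs W (j+1) - Pi := by rw [pvPs_succ]; ring
    by_cases hc : pvPs W (j+1) - Pi ≤ B
    · obtain ⟨m, h1, h2, h3, h4⟩ := ih (j+1) (c + V.getD j 0) (by omega)
      refine ⟨m, by omega, h2, ?_, ?_⟩
      · rw [pvWhile, if_pos ⟨by exact_mod_cast hj, by rw [hP]; exact hc⟩, hcast]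
        exact h3
      · rw [pvPkg, if_neg (by exact_mod_cast Nat.ne_of_lt hj),
          if_neg (by rw [hA]; show ¬ (pvPs W j - Pi + W.getD j 0 > B); rw [hstep]; omega)]
        rw [hA]
        have harg : pvPs W j - Pi + (W.getD j 0, V.getD j 0).1 = pvPs W (j+1) - Pi := by
          rw [pvPs_succ]; ring
        rw [harg, hcast]
        have harg2 : c + (W.getD j 0, V.getD j 0).2 = c + V.getD j 0 := rfl
        rw [harg2, h4, pvPs_succ]
        simp only [Prod.mk.injEq, true_and]
        ring
    · refine ⟨j, le_refl j, by omega, ?_, ?_⟩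
      · rw [pvWhile, if_neg (by rw [hP]; intro h; exact hc h.2)]
      · rw [pvPkg, if_neg (by exact_mod_cast Nat.ne_of_lt hj),
          if_pos (by rw [hA]; show pvPs W j - Pi + W.getD j 0 > B; rw [hstep]; omega)]
        simp

-- the per-start contribution to the answer, expressed through A's package walk
def pvContrib (B : Int) (W V : List Int) (n i : Nat) : Int :=
  if B < W.getD i 0 then 0
  else max (V.getD i 0)
    (pvPkg (pvArr W V n) (n : Int) B (n - (i+1)) ((i + 1 : Nat) : Int) (W.getD i 0, V.getD i 0)).2

def pvEntry (B : Int) (W V : List Int) (n j k : Nat) : Int × Int :=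
  if k < j then (W.getD k 0, pvContrib B W V n k) else (W.getD k 0, V.getD k 0)

lemma pvPQ (W V : List Int) : ∀ j : Nat,
    (List.range j).foldl (fun (x : List Int × List Int) (y : Nat) =>
        (x.1 ++ [PySem.List.pyGetD x.1 (-1) 0 + PySem.List.pyGetD W (y : Int) 0],
         x.2 ++ [PySem.List.pyGetD x.2 (-1) 0 + PySem.List.pyGetD V (y : Int) 0])) ([0],[0])
    = ((List.range (j+1)).map (pvPs W), (List.range (j+1)).map (pvPs V)) := by
  intro j
  induction j with
  | zero => simp [pvPs]
  | succ j ih =>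
    rw [List.range_succ, List.foldl_append, ih]
    simp only [List.foldl_cons, List.foldl_nil]
    rw [show List.range (j+1) = List.range j ++ [j] from List.range_succ]
    simp only [List.map_append, List.map_cons, List.map_nil]
    simp only [PySem.List.pyGetD, PySem.List.pyGet?_neg_one_append_singleton, Option.getD_some,
      PySem.List.pyGet?_natCast]
    rw [show List.range (j+1+1) = List.range (j+1) ++ [j+1] from List.range_succ,
        show List.range (j+1) = List.range j ++ [j] from List.range_succ]
    simp only [List.map_append, List.map_cons, List.map_nil, List.append_assoc]
    simp only [pvPs_succ, List.getD]
lemma pvEntry_getD (B : Int) (W V : List Int) (n j k : Nat) (hk : k < n) :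
    PySem.List.pyGetD ((List.range n).map (pvEntry B W V n j)) (k : Int) (0, 0)
      = pvEntry B W V n j k := by
  rw [PySem.List.pyGetD_natCast]; exact PySem.List.getD_map_range _ _ _ _ hk

lemma pvDp (B : Int) (W V : List Int) (n : Nat) : ∀ j, j ≤ n →
    (List.range j).foldl (fun (x : List (Int × Int)) (y : Nat) =>
      if (PySem.List.pyGetD (pvArr W V n) (y : Int) (0,0)).1 > B then
        x.set ((y : Int)).toNat ((PySem.List.pyGetD x (y : Int) (0,0)).1, 0)
      else
        x.set ((y : Int)).toNat ((PySem.List.pyGetD x (y : Int) (0,0)).1,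
          max (PySem.List.pyGetD x (y : Int) (0,0)).2
            (pvPkg (pvArr W V n) (n : Int) B ((n : Int) - ((y : Int) + 1)).toNat ((y : Int) + 1)
              ((PySem.List.pyGetD (pvArr W V n) (y : Int) (0,0)).1,
               (PySem.List.pyGetD (pvArr W V n) (y : Int) (0,0)).2)).2))
      (pvArr W V n)
    = (List.range n).map (pvEntry B W V n j) := by
  intro j
  induction j with
  | zero =>
    intro _
    simp only [List.range_zero, List.foldl_nil, pvArr]
    simp
    intro a _
    simp [pvEntry, List.getD]
  | succ j ih =>
    intro hj
    rw [List.range_succ, List.foldl_append, ih (by omega)]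
    simp only [List.foldl_cons, List.foldl_nil]
    have hjn : j < n := by omega
    have hE := pvEntry_getD B W V n j j hjn
    have hEj : pvEntry B W V n j j = (W.getD j 0, V.getD j 0) := by simp [pvEntry]
    have hA := pvArr_getD W V n j hjn
    have htn : ((j : Int)).toNat = j := by omega
    have hfuel : ((n : Int) - ((j : Int) + 1)).toNat = n - (j + 1) := by omega
    have hc1 : ((j : Int) + 1) = ((j + 1 : Nat) : Int) := by push_cast; ring
    rw [hE, hEj, hA, htn, hfuel, hc1]
    by_cases hB : B < W.getD j 0
    · rw [if_pos (by simpa using hB)]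
      refine List.ext_getElem (by simp) ?_
      intro i h1 h2
      simp only [List.getElem_set, List.getElem_map, List.getElem_range]
      have hi : i < n := by simpa using h2
      by_cases hij : j = i
      · subst hij
        simp [pvEntry, pvContrib]
        intro h
        exact absurd (by simpa [List.getD] using hB) (not_lt.mpr h)
      · rw [if_neg hij]
        simp only [pvEntry]
        split_ifs <;> first | rfl | omega
    · rw [if_neg (by simpa using hB)]
      refine List.ext_getElem (by simp) ?_
      intro i h1 h2
      simp only [List.getElem_set, List.getElem_map, List.getElem_range]
      have hi : i < n := by simpa using h2
      by_cases hij : j = i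
      · subst hij
        simp [pvEntry, pvContrib]
        intro h
        exact absurd h (by simpa [List.getD] using hB)
      · rw [if_neg hij]
        simp only [pvEntry]
        split_ifs <;> first | rfl | omega
lemma pvFoldMax (B : Int) (W V : List Int) (n : Nat) :
    ∀ (l : List Nat) (t : Int), 0 ≤ t →
    l.foldl (fun x y => max x (pvContrib B W V n y)) t
      = l.foldl (fun x y => if B < W.getD y 0 then x else max x (pvContrib B W V n y)) t := by
  intro l
  induction l with
  | nil => intro t _; rfl
  | cons y l ih =>
    intro t ht
    simp only [List.foldl_cons]
    by_cases hB : B < W.getD y 0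
    · rw [if_pos hB, show pvContrib B W V n y = 0 from by simp only [pvContrib, if_pos hB],
          max_eq_left ht]
      exact ih t ht
    · rw [if_neg hB]
      exact ih _ (le_trans ht (le_max_left _ _))

theorem pvMain (n : Nat) (B : Int) (W V : List Int) :
    program_7 (n : Int) B W V = program_7_alt (n : Int) B W V := by
  simp only [program_7, program_7_alt, PySem.List.pyRange_zero_natCast, List.foldl_map,
    List.map_map]
  have harr : List.map ((fun i => (PySem.List.pyGetD W i 0, PySem.List.pyGetD V i 0))
      ∘ fun k : Nat => (k : Int)) (List.range n) = pvArr W V n := by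
    simp [pvArr, Function.comp_def, PySem.List.pyGetD_natCast]
  rw [harr]
  have hdp0 : List.map ((fun i => ((PySem.List.pyGetD (pvArr W V n) i (0, 0)).1,
      (PySem.List.pyGetD (pvArr W V n) i (0, 0)).2)) ∘ fun k : Nat => (k : Int))
      (List.range n) = pvArr W V n := by
    conv_rhs => rw [pvArr]
    apply List.map_congr_left
    intro k hk
    rw [Function.comp_apply, pvArr_getD W V n k (List.mem_range.mp hk)]
  rw [hdp0, pvDp B W V n n (le_refl n)]
  simp only [pvPQ W V n]
  trans (List.foldl (fun x y => max x (pvContrib B W V n y)) 0 (List.range n))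
  · refine PySem.List.foldl_congr_mem _ _ _ _ ?_
    intro x y hy
    have hy' := List.mem_range.mp hy
    rw [pvEntry_getD B W V n n y hy']
    simp [pvEntry, hy']
  trans (List.foldl (fun x y => if B < W.getD y 0 then x else max x (pvContrib B W V n y)) 0
      (List.range n))
  · exact pvFoldMax B W V n (List.range n) 0 (le_refl 0)
  refine PySem.List.foldl_congr_mem _ _ _ _ ?_
  intro x y hy
  have hy' := List.mem_range.mp hy
  have hPi : PySem.List.pyGetD ((List.range (n+1)).map (pvPs W)) (y : Int) 0 = pvPs W y :=
    pvPsList_getD W n y (by omega)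
  have hfuel : ((n : Int) - ((y : Int) + 1)).toNat = n - (y + 1) := by omega
  have hc1 : ((y : Int) + 1) = ((y + 1 : Nat) : Int) := by push_cast; ring
  obtain ⟨m, hm1, hm2, hW3, hP4⟩ := pvCore W V n B (pvPs W y) (n - (y+1)) (y+1)
    (V.getD y 0) (by omega)
  rw [hPi, hfuel, hc1, hW3]
  rw [pvPsList_getD V n m (by omega), pvPsList_getD V n y (by omega)]
  simp only [PySem.List.pyGetD_natCast]
  have hargW : pvPs W (y+1) - pvPs W y = W.getD y 0 := by rw [pvPs_succ]; ring
  have hargV : V.getD y 0 + (pvPs V m - pvPs V (y+1)) = pvPs V m - pvPs V y := by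
    rw [pvPs_succ]; ring
  have hpkg : (pvPkg (pvArr W V n) (n : Int) B (n - (y+1)) ((y + 1 : Nat) : Int)
      (W.getD y 0, V.getD y 0)).2 = pvPs V m - pvPs V y := by
    rw [show ((W.getD y 0 : Int), (V.getD y 0 : Int)) = (pvPs W (y+1) - pvPs W y, V.getD y 0)
      from by rw [hargW], hP4]
    exact hargV
  simp only [pvContrib]
  split_ifs with h1
  · rfl
  · rw [hpkg]

-- ===== VERDICT (by name: the statement is the Claim_ definition above) =====
theorem program_7_spec : Claim_equal_program_7 := by
  intro N B W V _ _
  unfold Spec_program_7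
  rcases (by omega : 0 ≤ N ∨ N < 0) with h | h
  · obtain ⟨n, rfl⟩ := Int.eq_ofNat_of_zero_le h
    exact pvMain n B W V
  · simp [program_7, program_7_alt, PySem.List.pyRange_one_eq_nil (le_of_lt h)]
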